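-- pv_equiv track=rewrite | github.com/Gang859/myMFP | src/gen_win_feature_follow_STIM.py | _get_bit_dq_burst_info
-- ===== SOURCE A (Python) =====
-- from typing import Dict, Tuple, NoReturn, Union, List
--
-- def _get_bit_dq_burst_info(bin_parity) -> Tuple[int, int, int, int, int]:
--     """
--     获取特定 parity 的奇偶校验信息
--
--     :param parity: 奇偶校验值
--     :return: parity 的奇偶校验信息
--
--     - bit_count: parity 错误 bit 数量
--     - dq_count: parity 错误 dq 数量
--     - burst_count: parity 错误 burst 数量
--     - max_dq_interval: parity 错误 dq 的最大间隔
--     - max_burst_interval: parity 错误 burst 的最大间隔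
--     """
--
--     # 将 Parity 转换为 32 位二进制字符串
--     # bin_parity = bin(parity)[2:].zfill(32)
--
--     # 计算错误 bit 数量
--     bit_count = bin_parity.count("1")
--
--     # 计算 burst 相关特征
--     binary_row_array = [
--         bin_parity[i: i + 4].count("1") for i in range(0, 32, 4)]
--     binary_row_array_indices = [
--         idx for idx, value in enumerate(binary_row_array) if value > 0
--     ]
--     burst_count = len(binary_row_array_indices)
--     max_burst_interval = (
--         binary_row_array_indices[-1] - binary_row_array_indices[0]
--         if binary_row_array_indices
--         else 0
--     )
--
--     # 计算 dq 相关特征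
--     binary_column_array = [bin_parity[i::4].count("1") for i in range(4)]
--     binary_column_array_indices = [
--         idx for idx, value in enumerate(binary_column_array) if value > 0
--     ]
--     dq_count = len(binary_column_array_indices)
--     max_dq_interval = (
--         binary_column_array_indices[-1] - binary_column_array_indices[0]
--         if binary_column_array_indices
--         else 0
--     )
--
--     return bit_count, dq_count, burst_count, max_dq_interval, max_burst_interval
-- ===== SOURCE B (Python) =====
-- def _get_bit_dq_burst_info(bin_parity):
--     # One pass over the string instead of three separate scans:
--     # count '1' bits, and record which row (j//4, first 32 chars only)
--     # and which column (j%4) each '1' falls in, as presence sets.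
--     bit_count = 0
--     rows = set()
--     cols = set()
--     for j, ch in enumerate(bin_parity):
--         if ch == "1":
--             bit_count += 1
--             if j < 32:
--                 rows.add(j // 4)
--             cols.add(j % 4)
--     burst_count = len(rows)
--     dq_count = len(cols)
--     max_burst_interval = max(rows) - min(rows) if rows else 0
--     max_dq_interval = max(cols) - min(cols) if cols else 0
--     return bit_count, dq_count, burst_count, max_dq_interval, max_burst_interval
-- ===== Notes on version B (the rewrite author's own statement) =====
-- stated objective: simpler
-- what changed: Replaces the three separate scans (global count, eight row-slice counts, four strided column counts) by a single pass over enumerate(bin_parity) that counts '1's and records row (j//4, only j<32) and column (j%4) presence sets, from which counts and max-min intervals are read off.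
import Mathlib
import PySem

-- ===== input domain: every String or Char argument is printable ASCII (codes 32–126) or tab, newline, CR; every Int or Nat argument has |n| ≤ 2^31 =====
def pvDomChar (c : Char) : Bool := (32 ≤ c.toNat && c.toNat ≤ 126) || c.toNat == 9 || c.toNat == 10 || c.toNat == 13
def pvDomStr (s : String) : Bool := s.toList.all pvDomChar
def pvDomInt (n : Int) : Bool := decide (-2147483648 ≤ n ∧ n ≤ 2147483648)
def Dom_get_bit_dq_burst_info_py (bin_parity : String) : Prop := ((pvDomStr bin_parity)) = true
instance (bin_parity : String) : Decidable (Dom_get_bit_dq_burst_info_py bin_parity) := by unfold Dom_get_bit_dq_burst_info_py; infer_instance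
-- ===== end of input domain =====

-- B replaces A's three separate scans by one pass over enumerate(bin_parity) maintaining a bit
-- count and row/column presence sets (objective: simpler, same O(n) cost).

-- ===== PORT A =====
-- Literal transliteration of the Python A: global "1" count, then the eight row slices
-- bin_parity[i:i+4] for i in range(0,32,4), then the four strided column slices bin_parity[i::4].
-- (In the column slices the step is 4 ≠ 0, so PySem.Str.slice? is always `some`; `.getD ""` only
-- unwraps that.)
def get_bit_dq_burst_info_py (bin_parity : String) : Int × Int × Int × Int × Int :=
  let bit_count : Int := (PySem.Str.count bin_parity "1" : Int)
  let binary_row_array : List Int :=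
    (PySem.List.pyRange 0 32 4).map
      (fun i => (PySem.Str.count (PySem.Str.slice bin_parity (some i) (some (i + 4))) "1" : Int))
  let binary_row_array_indices : List Int :=
    ((PySem.List.enumerate binary_row_array 0).filter (fun p => decide (0 < p.2))).map (fun p => p.1)
  let burst_count : Int := (binary_row_array_indices.length : Int)
  let max_burst_interval : Int :=
    if binary_row_array_indices.isEmpty then 0
    else PySem.List.pyGetD binary_row_array_indices (-1) 0 -
         PySem.List.pyGetD binary_row_array_indices 0 0
  let binary_column_array : List Int :=
    (PySem.List.pyRange 0 4 1).map
      (fun i => (PySem.Str.count ((PySem.Str.slice? bin_parity (some i) none 4).getD "") "1" : Int))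
  let binary_column_array_indices : List Int :=
    ((PySem.List.enumerate binary_column_array 0).filter (fun p => decide (0 < p.2))).map (fun p => p.1)
  let dq_count : Int := (binary_column_array_indices.length : Int)
  let max_dq_interval : Int :=
    if binary_column_array_indices.isEmpty then 0
    else PySem.List.pyGetD binary_column_array_indices (-1) 0 -
         PySem.List.pyGetD binary_column_array_indices 0 0
  (bit_count, dq_count, burst_count, max_dq_interval, max_burst_interval)

-- ===== PORT B =====
-- Loop body of B's single pass: on a '1' at index j, bump the bit count, add j//4 to the row
-- presence set when j < 32, and add j%4 to the column presence set.
def pvAltStep (st : Int × PySem.Set Int × PySem.Set Int) (p : Int × Char) :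
    Int × PySem.Set Int × PySem.Set Int :=
  if p.2 = '1' then
    (st.1 + 1,
     (if p.1 < 32 then PySem.Set.add st.2.1 (PySem.Int.floordiv p.1 4) else st.2.1),
     PySem.Set.add st.2.2 (PySem.Int.mod p.1 4))
  else st

def get_bit_dq_burst_info_py_alt (bin_parity : String) : Int × Int × Int × Int × Int :=
  let st := (PySem.List.enumerate bin_parity.toList 0).foldl pvAltStep
      (0, PySem.Set.empty, PySem.Set.empty)
  let bit_count := st.1
  let rows := st.2.1
  let cols := st.2.2
  let burst_count : Int := PySem.Set.len rows
  let dq_count : Int := PySem.Set.len cols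
  let max_burst_interval : Int :=
    if rows.isEmpty then 0
    else (PySem.List.max? rows (fun x => x)).getD 0 - (PySem.List.min? rows (fun x => x)).getD 0
  let max_dq_interval : Int :=
    if cols.isEmpty then 0
    else (PySem.List.max? cols (fun x => x)).getD 0 - (PySem.List.min? cols (fun x => x)).getD 0
  (bit_count, dq_count, burst_count, max_dq_interval, max_burst_interval)

-- ===== PRECONDITION & SPEC =====
def Spec_get_bit_dq_burst_info_py (bin_parity : String) (out : Int × Int × Int × Int × Int) : Prop := out = get_bit_dq_burst_info_py_alt bin_parity
instance (bin_parity : String) (out : Int × Int × Int × Int × Int) : Decidable (Spec_get_bit_dq_burst_info_py bin_parity out) := by unfold Spec_get_bit_dq_burst_info_py; infer_instance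

-- ===== CLAIM (what is proved, stated in full; the proofs are below) =====
def Claim_equal_get_bit_dq_burst_info_py : Prop := ∀ (bin_parity : String), Dom_get_bit_dq_burst_info_py bin_parity → Spec_get_bit_dq_burst_info_py bin_parity (get_bit_dq_burst_info_py bin_parity)

-- ===== LEMMAS AND PROOFS =====

-- count of a single-character pattern is List.count
theorem pvCountGoSingleton (c : Char) (l : List Char) (fuel acc : Nat) (h : l.length ≤ fuel) :
    PySem.Chars.count.go [c] fuel l acc = acc + l.count c := by
  induction l generalizing fuel acc with
  | nil => cases fuel <;> simp [PySem.Chars.count.go]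
  | cons x t ih =>
    cases fuel with
    | zero => simp at h
    | succ fuel =>
      simp only [PySem.Chars.count.go, List.isPrefixOf, List.count_cons]
      have ht : t.length ≤ fuel := by simpa using h
      by_cases hx : c = x
      · subst hx
        simp [ih fuel (acc + 1) ht]
        omega
      · simp [beq_iff_eq, hx, Ne.symm hx, ih fuel acc ht]

theorem pvCountSingleton (l : List Char) (c : Char) :
    PySem.Chars.count l [c] = l.count c := by
  simpa using pvCountGoSingleton c l l.length 0 le_rfl

-- index lists of B's single pass
def pvRowKeys (l : List Char) (s : Int) : List Int :=
  ((PySem.List.enumerate l s).filter (fun p => p.2 = '1' ∧ p.1 < 32)).map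
    (fun p => PySem.Int.floordiv p.1 4)

def pvColKeys (l : List Char) (s : Int) : List Int :=
  ((PySem.List.enumerate l s).filter (fun p => p.2 = '1')).map
    (fun p => PySem.Int.mod p.1 4)

-- characterisation of B's fold
theorem pvFoldChar (l : List Char) (s : Int) (bc : Int) (rows cols : PySem.Set Int) :
    (PySem.List.enumerate l s).foldl pvAltStep (bc, rows, cols) =
      (bc + l.count '1', PySem.Set.update rows (pvRowKeys l s),
        PySem.Set.update cols (pvColKeys l s)) := by
  induction l generalizing s bc rows cols with
  | nil => simp [pvRowKeys, pvColKeys, PySem.List.enumerate, PySem.Set.update]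
  | cons x t ih =>
    rw [PySem.List.enumerate_cons]
    simp only [List.foldl_cons]
    by_cases hx : x = '1'
    · subst hx
      by_cases hs : s < 32
      · simp [pvAltStep, pvRowKeys, pvColKeys, PySem.List.enumerate_cons, hs,
          ih, PySem.Set.update, add_comm, add_left_comm]
      · simp [pvAltStep, pvRowKeys, pvColKeys, PySem.List.enumerate_cons, hs,
          ih, PySem.Set.update, add_comm, add_left_comm]
    · simp [pvAltStep, pvRowKeys, pvColKeys, PySem.List.enumerate_cons, hx, ih]

theorem pvFdivNat (k : Nat) : PySem.Int.floordiv (k : Int) 4 = ((k / 4 : Nat) : Int) := by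
  simp [PySem.Int.floordiv, Int.fdiv_eq_ediv]

theorem pvFmodNat (k : Nat) : PySem.Int.mod (k : Int) 4 = ((k % 4 : Nat) : Int) := by
  simp [PySem.Int.mod, Int.fmod_eq_emod]

-- membership in the key lists
theorem pvMemRowKeys (cs : List Char) (x : Int) :
    x ∈ pvRowKeys cs 0 ↔
      ∃ j : Nat, j < cs.length ∧ j < 32 ∧ cs[j]? = some '1' ∧ x = ((j / 4 : Nat) : Int) := by
  unfold pvRowKeys
  simp only [List.mem_map, List.mem_filter, PySem.List.mem_enumerate_iff, zero_add]
  constructor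
  · rintro ⟨p, ⟨⟨k, hk, rfl⟩, hcond⟩, rfl⟩
    simp only [decide_eq_true_eq] at hcond
    exact ⟨k, hk, by exact_mod_cast hcond.2, by simp [hcond.1, List.getElem?_eq_getElem hk],
      pvFdivNat k⟩
  · rintro ⟨j, hj, hj32, hget, rfl⟩
    refine ⟨((j : Int), '1'),
      ⟨⟨j, hj, by simp [List.getElem?_eq_getElem hj] at hget; simp [hget]⟩,
        by simp; exact_mod_cast hj32⟩, pvFdivNat j⟩

theorem pvMemColKeys (cs : List Char) (x : Int) :
    x ∈ pvColKeys cs 0 ↔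
      ∃ j : Nat, j < cs.length ∧ cs[j]? = some '1' ∧ x = ((j % 4 : Nat) : Int) := by
  unfold pvColKeys
  simp only [List.mem_map, List.mem_filter, PySem.List.mem_enumerate_iff, zero_add]
  constructor
  · rintro ⟨p, ⟨⟨k, hk, rfl⟩, hcond⟩, rfl⟩
    simp only [decide_eq_true_eq] at hcond
    exact ⟨k, hk, by simp [hcond, List.getElem?_eq_getElem hk], pvFmodNat k⟩
  · rintro ⟨j, hj, hget, rfl⟩
    refine ⟨((j : Int), '1'),
      ⟨⟨j, hj, by simp [List.getElem?_eq_getElem hj] at hget; simp [hget]⟩, by simp⟩, pvFmodNat j⟩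

-- A's filtered-enumerate pattern over a mapped range
theorem pvEnumMapRange (h : Nat → Int) (m : Nat) :
    ((PySem.List.enumerate ((List.range m).map h) 0).filter (fun p => decide (0 < p.2))).map
        (fun p => p.1)
      = (((List.range m).filter (fun k => decide (0 < h k))).map (fun k : Nat => (k : Int))) := by
  induction m with
  | zero => simp
  | succ m ih =>
    rw [List.range_succ, List.map_append, PySem.List.enumerate_append]
    simp only [List.filter_append, List.map_append, ih]
    simp [PySem.List.enumerate_cons, List.filter_cons]
    by_cases hq : 0 < h m <;> simp [hq]

-- the row-slice count is positive iff some '1' sits in positions 4k..4k+3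
theorem pvRowCntPos (cs : List Char) (k : Nat) :
    (0 < ((cs.drop (4 * k)).take 4).count '1') ↔
      ∃ j : Nat, j < cs.length ∧ 4 * k ≤ j ∧ j < 4 * k + 4 ∧ cs[j]? = some '1' := by
  rw [List.count_pos_iff]
  constructor
  · intro hm
    obtain ⟨i, hi, hget⟩ := List.mem_iff_getElem.mp hm
    have hi' : i < 4 ∧ 4 * k + i < cs.length := by
      have := hi
      simp [List.length_take, List.length_drop] at this
      omega
    refine ⟨4 * k + i, hi'.2, by omega, by omega, ?_⟩
    rw [List.getElem?_eq_getElem hi'.2]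
    rw [List.getElem_take, List.getElem_drop] at hget
    simp [hget]
  · rintro ⟨j, hj, hj1, hj2, hget⟩
    rw [List.getElem?_eq_getElem hj] at hget
    rw [List.mem_iff_getElem]
    refine ⟨j - 4 * k, by simp [List.length_take, List.length_drop]; omega, ?_⟩
    rw [List.getElem_take, List.getElem_drop]
    simpa [Nat.add_sub_cancel' hj1] using hget

-- the strided column slice contains a '1' iff some '1' sits at a position ≡ i (mod 4)
theorem pvColCntPos (cs : List Char) (i : Nat) (hi : i < 4) :
    (0 < ((PySem.List.slice? cs (some (i : Int)) none 4).getD []).count '1') ↔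
      ∃ j : Nat, j < cs.length ∧ j % 4 = i ∧ cs[j]? = some '1' := by
  rw [PySem.List.slice?, PySem.List.sliceIndices]
  simp only [if_neg (by norm_num : (4:Int) ≠ 0)]
  norm_num
  rw [if_neg (by omega : ¬ ((i:Int) < 0))]
  by_cases hin : i ≤ cs.length
  · rw [min_eq_left (by exact_mod_cast hin)]
    constructor
    · rintro ⟨a, ha, hget⟩
      by_cases hlt : (i:Int) < (cs.length : Int)
      · rw [if_pos hlt] at ha
        have htn : (((i:Int) + 4 * (a:Int)).toNat) = i + 4 * a := by omega
        rw [htn] at hget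
        have hj : i + 4 * a < cs.length := by
          have := List.getElem?_eq_some_iff.mp hget
          exact this.1
        exact ⟨i + 4 * a, hj, by omega, hget⟩
      · rw [if_neg hlt] at ha; omega
    · rintro ⟨j, hj, hmod, hget⟩
      have hilt : (i:Int) < (cs.length:Int) := by
        have : i ≤ j := by omega
        exact_mod_cast lt_of_le_of_lt this hj
      rw [if_pos hilt]
      refine ⟨(j - i) / 4, ?_, ?_⟩
      · have h4 : 4 * ((j - i) / 4) = j - i := by omega
        zify at hj ⊢
        omega
      · have htn : (((i:Int) + 4 * (((j - i) / 4 : Nat) : Int)).toNat) = j := by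
          push_cast; omega
        rw [htn]; exact hget
  · rw [min_eq_right (by exact_mod_cast (le_of_not_ge hin) : (cs.length:Int) ≤ (i:Int))]
    rw [if_neg (by omega)]
    constructor
    · rintro ⟨a, ha, _⟩; omega
    · rintro ⟨j, hj, hmod, _⟩
      exfalso
      have : j < 4 := by omega
      omega

-- pyGetD at 0 / -1 on a nonempty list
theorem pvPyGetDZero {α : Type} (l : List α) (d : α) (h : l ≠ []) :
    PySem.List.pyGetD l 0 d = l.head h := by
  cases l with
  | nil => simp at h
  | cons x t => simp [PySem.List.pyGetD, PySem.List.pyGet?, PySem.List.pyIdx?]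

theorem pvPyGetDNegOne {α : Type} (l : List α) (d : α) (h : l ≠ []) :
    PySem.List.pyGetD l (-1) d = l.getLast h := by
  have hl : 0 < l.length := List.length_pos_iff.mpr h
  have h1 : ¬ ((0:Int) ≤ -1) := by omega
  have h2 : -(l.length : Int) ≤ -1 := by omega
  simp only [PySem.List.pyGetD, PySem.List.pyGet?, PySem.List.pyIdx?, if_neg h1, if_pos h2,
    show (-(-1:Int)).toNat = 1 from by norm_num]
  rw [Option.bind_some, List.getElem?_eq_getElem (by omega : l.length - 1 < l.length)]
  simp [List.getLast_eq_getElem]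

-- bounds from a strictly increasing list
theorem pvLeGetLast (l : List Int) (hl : l.Pairwise (· < ·)) (h : l ≠ []) :
    ∀ y ∈ l, y ≤ l.getLast h := by
  induction l with
  | nil => simp at h
  | cons x t ih =>
    intro y hy
    rcases List.mem_cons.mp hy with rfl | hyt
    · rcases eq_or_ne t [] with ht | ht
      · subst ht; simp
      · have hx : ∀ z ∈ t, y < z := (List.pairwise_cons.mp hl).1
        rw [List.getLast_cons ht]
        have := hx (t.getLast ht) (List.getLast_mem _)
        omega
    · have ht : t ≠ [] := List.ne_nil_of_mem hyt
      rw [List.getLast_cons ht]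
      exact ih (List.pairwise_cons.mp hl).2 ht y hyt

theorem pvHeadLe (l : List Int) (hl : l.Pairwise (· < ·)) (h : l ≠ []) :
    ∀ y ∈ l, l.head h ≤ y := by
  cases l with
  | nil => simp at h
  | cons x t =>
    intro y hy
    rcases List.mem_cons.mp hy with rfl | hyt
    · simp
    · simpa using le_of_lt ((List.pairwise_cons.mp hl).1 y hyt)

-- combiner: a strictly increasing list and a dup-free set with the same members give the same
-- length and the same (last-first | max-min) interval
theorem pvPairEq (L S : List Int) (hL : L.Pairwise (· < ·)) (hS : S.Nodup)
    (hmem : ∀ x, x ∈ L ↔ x ∈ S) :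
    ((L.length : Int) = (S.length : Int)) ∧
      ((if L.isEmpty then (0 : Int)
        else PySem.List.pyGetD L (-1) 0 - PySem.List.pyGetD L 0 0) =
       (if S.isEmpty then (0 : Int)
        else (PySem.List.max? S (fun x => x)).getD 0 - (PySem.List.min? S (fun x => x)).getD 0)) := by
  have hLnd : L.Nodup := hL.imp ne_of_lt
  have hperm : List.Perm L S := (List.perm_ext_iff_of_nodup hLnd hS).mpr hmem
  refine ⟨by exact_mod_cast hperm.length_eq, ?_⟩
  rcases eq_or_ne L [] with hLe | hLe
  · have hSe : S = [] := by
      subst hLe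
      exact List.eq_nil_iff_forall_not_mem.mpr (fun x hx => by simp [← hmem x] at hx)
    simp [hLe, hSe]
  · have hSe : S ≠ [] := fun hs =>
      hLe (List.eq_nil_iff_forall_not_mem.mpr (fun x hx => by
        have := (hmem x).mp hx; simp [hs] at this))
    rw [if_neg (by simpa using hLe), if_neg (by simpa using hSe)]
    obtain ⟨m, hm⟩ := Option.ne_none_iff_exists'.mp
      (fun hnone => hSe ((PySem.List.max?_eq_none_iff S (fun x : Int => x)).mp hnone))
    obtain ⟨m', hm'⟩ := Option.ne_none_iff_exists'.mp
      (fun hnone => hSe ((PySem.List.min?_eq_none_iff S (fun x : Int => x)).mp hnone))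
    rw [pvPyGetDNegOne L 0 hLe, pvPyGetDZero L 0 hLe, hm, hm']
    have hmax : L.getLast hLe = m := by
      refine le_antisymm ?_ ?_
      · exact PySem.List.max?_isMax hm _ ((hmem _).mp (List.getLast_mem hLe))
      · exact pvLeGetLast L hL hLe m ((hmem m).mpr (PySem.List.max?_mem hm))
    have hmin : L.head hLe = m' := by
      refine le_antisymm ?_ ?_
      · exact pvHeadLe L hL hLe m' ((hmem m').mpr (PySem.List.min?_mem hm'))
      · exact PySem.List.min?_isMin hm' _ ((hmem _).mp (List.head_mem hLe))
    simp [hmax, hmin]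

-- string-side forms of the slice counts
theorem pvRowSliceCount (s : String) (k : Nat) :
    (PySem.Str.count (PySem.Str.slice s (some ((4 * k : Nat) : Int))
        (some (((4 * k : Nat) : Int) + 4))) "1")
      = ((s.toList.drop (4 * k)).take 4).count '1' := by
  rw [PySem.Str.count_eq, show ("1".toList) = ['1'] from rfl]
  rw [PySem.Str.slice, String.toList_ofList, PySem.Chars.slice_eq_listSlice]
  rw [show (((4 * k : Nat) : Int) + 4) = (((4 * k : Nat) : Int) + ((4 : Nat) : Int)) from by
    norm_num]
  rw [PySem.List.slice_natCast_add, pvCountSingleton]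

theorem pvColSliceCount (s : String) (a : Int) :
    (PySem.Str.count ((PySem.Str.slice? s (some a) none 4).getD "") "1")
      = ((PySem.List.slice? s.toList (some a) none 4).getD []).count '1' := by
  rw [PySem.Str.slice?, PySem.Chars.slice?_eq_listSlice?]
  cases h : PySem.List.slice? s.toList (some a) none 4 with
  | none => simp [PySem.Str.count_eq, pvCountSingleton]
  | some ys =>
    simp [PySem.Str.count_eq, String.toList_ofList, pvCountSingleton]

-- the main equality
theorem pvMain (s : String) :
    get_bit_dq_burst_info_py s = get_bit_dq_burst_info_py_alt s := by
  simp only [get_bit_dq_burst_info_py, get_bit_dq_burst_info_py_alt]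
  rw [pvFoldChar]
  rw [show PySem.List.pyRange 0 32 4 = (List.range 8).map (fun k => ((4 * k : Nat) : Int))
      from by decide]
  rw [show PySem.List.pyRange 0 4 1 = (List.range 4).map (fun k => ((k : Nat) : Int))
      from by decide]
  rw [List.map_map, List.map_map]
  rw [pvEnumMapRange _ 8, pvEnumMapRange _ 4]
  simp only [Function.comp, pvRowSliceCount, pvColSliceCount, Nat.cast_pos]
  have hR := pvPairEq
    (((List.range 8).filter
        (fun k => decide (0 < ((s.toList.drop (4 * k)).take 4).count '1'))).map (fun k : Nat => (k : Int)))
    (PySem.Set.update PySem.Set.empty (pvRowKeys s.toList 0))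
    ((List.pairwise_map).mpr ((List.Pairwise.sublist List.filter_sublist List.pairwise_lt_range).imp
      (fun h => by exact_mod_cast h)))
    (PySem.Set.nodup_ofList (pvRowKeys s.toList 0))
    (by
      intro x
      rw [show PySem.Set.update PySem.Set.empty (pvRowKeys s.toList 0)
            = PySem.Set.ofList (pvRowKeys s.toList 0) from rfl,
        PySem.Set.mem_ofList, pvMemRowKeys]
      simp only [List.mem_map, List.mem_filter, List.mem_range, decide_eq_true_eq, pvRowCntPos]
      constructor
      · rintro ⟨k, ⟨hk8, j, hj, hj1, hj2, hget⟩, rfl⟩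
        exact ⟨j, hj, by omega, hget, by rw [show j / 4 = k from by omega]⟩
      · rintro ⟨j, hj, hj32, hget, rfl⟩
        exact ⟨j / 4, ⟨by omega, j, hj, by omega, by omega, hget⟩, rfl⟩)
  have hC := pvPairEq
    (((List.range 4).filter
        (fun k : Nat =>
          decide (0 < ((PySem.List.slice? s.toList (some ((k : Nat) : Int)) none 4).getD []).count '1'))).map
      (fun k : Nat => (k : Int)))
    (PySem.Set.update PySem.Set.empty (pvColKeys s.toList 0))
    ((List.pairwise_map).mpr ((List.Pairwise.sublist List.filter_sublist List.pairwise_lt_range).imp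
      (fun h => by exact_mod_cast h)))
    (PySem.Set.nodup_ofList (pvColKeys s.toList 0))
    (by
      intro x
      rw [show PySem.Set.update PySem.Set.empty (pvColKeys s.toList 0)
            = PySem.Set.ofList (pvColKeys s.toList 0) from rfl,
        PySem.Set.mem_ofList, pvMemColKeys]
      simp only [List.mem_map, List.mem_filter, List.mem_range, decide_eq_true_eq]
      constructor
      · rintro ⟨k, ⟨hk4, hpos⟩, rfl⟩
        obtain ⟨j, hj, hmod, hget⟩ := (pvColCntPos s.toList k hk4).mp hpos
        exact ⟨j, hj, hget, by rw [hmod]⟩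
      · rintro ⟨j, hj, hget, rfl⟩
        refine ⟨j % 4, ⟨by omega, ?_⟩, rfl⟩
        exact (pvColCntPos s.toList (j % 4) (by omega)).mpr ⟨j, hj, rfl, hget⟩)
  simp only [Prod.mk.injEq]
  refine ⟨?_, ?_, ?_, ?_, ?_⟩
  · rw [PySem.Str.count_eq, show ("1".toList) = ['1'] from rfl, pvCountSingleton]
    omega
  · exact hC.1
  · exact hR.1
  · exact hC.2
  · exact hR.2

-- ===== VERDICT (by name: the statement is the Claim_ definition above) =====
theorem get_bit_dq_burst_info_py_spec : Claim_equal_get_bit_dq_burst_info_py := by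
  intro bin_parity _
  unfold Spec_get_bit_dq_burst_info_py
  exact (pvMain bin_parity)
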